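-- pv_equiv track=rewrite | github.com/izzyrybz/QA_Git | complex_queries.py | normalize_var_combo
-- ===== SOURCE A (Python) =====
-- def normalize_var_combo(combo):
--     var_dict = {}
--     next_var = 0
--     normalized_combo = []
--     for element in combo:
--         if element.startswith("?u_"):
--             if element not in var_dict:
--                 var_dict[element] = f"?u_{next_var}"
--                 next_var += 1
--             normalized_combo.append(var_dict[element])
--         else:
--             normalized_combo.append(element)
--     return tuple(normalized_combo)
-- ===== SOURCE B (Python) =====
-- def normalize_var_combo(combo):
--     # Rank of a variable = number of distinct ?u_ variables occurring strictly
--     # before its first occurrence; no mapping table or counter is maintained.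
--     def rank(e):
--         first = combo.index(e)
--         return len({x for x in combo[:first] if x.startswith("?u_")})
--     return tuple(f"?u_{rank(e)}" if e.startswith("?u_") else e for e in combo)
-- ===== Notes on version B (the rewrite author's own statement) =====
-- stated objective: alternative
-- what changed: Eliminates all mutable state (dict, counter, accumulator): each ?u_ element is renamed independently by a closed-form rank — the number of distinct ?u_ variables in the prefix of the list before that element's first occurrence — so the result is a pure map over the input with no rename table at all.
import Mathlib
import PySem

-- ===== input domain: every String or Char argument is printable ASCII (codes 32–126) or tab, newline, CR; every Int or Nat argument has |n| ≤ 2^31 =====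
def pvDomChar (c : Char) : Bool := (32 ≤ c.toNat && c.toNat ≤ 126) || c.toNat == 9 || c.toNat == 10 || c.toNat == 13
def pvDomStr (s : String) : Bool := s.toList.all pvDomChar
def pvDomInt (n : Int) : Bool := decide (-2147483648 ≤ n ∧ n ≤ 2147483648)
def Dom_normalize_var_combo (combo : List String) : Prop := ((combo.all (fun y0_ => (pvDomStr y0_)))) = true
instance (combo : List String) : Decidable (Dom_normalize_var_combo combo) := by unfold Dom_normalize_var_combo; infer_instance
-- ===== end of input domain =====

-- B renames each ?u_ element independently by a closed-form rank (distinct ?u_ variables before its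
-- first occurrence) instead of A's stateful streaming pass with a dict and a counter; B has no rename
-- table or mutable state (an alternative decomposition; B is O(n^2) where A is O(n)).

-- ===== PORT A =====
-- A's for-loop as structural recursion over the same state (var_dict, next_var, normalized_combo)
def nvcLoop (rest : List String) (d : PySem.Dict String String) (n : Int) (acc : List String) : List String :=
  match rest with
  | [] => acc
  | e :: rest =>
    if PySem.Str.startswith e "?u_" then
      if d.contains e = false then
        -- var_dict[element] = f"?u_{next_var}"; next_var += 1; append var_dict[element]
        let d' := d.insert e ("?u_" ++ PySem.Int.toStr n)
        nvcLoop rest d' (n + 1) (acc ++ [d'.getD e ""])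
      else
        -- the key is always present here, so the lookup var_dict[element] cannot raise: getD with a dummy default
        nvcLoop rest d n (acc ++ [d.getD e ""])
    else nvcLoop rest d n (acc ++ [e])

def normalize_var_combo (combo : List String) : List String :=
  nvcLoop combo PySem.Dict.empty 0 []

-- ===== PORT B =====
-- rank(e): first = combo.index(e); len({x for x in combo[:first] if x.startswith("?u_")})
-- rank is only called on elements of combo, so combo.index(e) cannot raise: index? with getD 0
def nvcRank (combo : List String) (e : String) : Nat :=
  let first := (PySem.List.index? combo e).getD 0
  (PySem.Set.ofList ((PySem.List.slice combo none (some (first : Int))).filter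
      (fun x => PySem.Str.startswith x "?u_"))).length

def normalize_var_combo_alt (combo : List String) : List String :=
  combo.map (fun e => if PySem.Str.startswith e "?u_"
    then "?u_" ++ PySem.Int.toStr ((nvcRank combo e : Nat) : Int) else e)

-- ===== PRECONDITION & SPEC =====
def Spec_normalize_var_combo (combo : List String) (out : List String) : Prop := out = normalize_var_combo_alt combo
instance (combo : List String) (out : List String) : Decidable (Spec_normalize_var_combo combo out) := by unfold Spec_normalize_var_combo; infer_instance

-- ===== CLAIM (what is proved, stated in full; the proofs are below) =====
def Claim_equal_normalize_var_combo : Prop := ∀ (combo : List String), Dom_normalize_var_combo combo → Spec_normalize_var_combo combo (normalize_var_combo combo)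

-- ===== LEMMAS AND PROOFS =====

-- reference recursion: rename each element by its index in the seen-so-far list s
def nvcRef : List String → List String → List String
  | [], _ => []
  | e :: rest, s =>
    if PySem.Str.startswith e "?u_" then
      if e ∈ s then
        ("?u_" ++ PySem.Int.toStr (((PySem.List.index? s e).getD 0 : Nat) : Int)) :: nvcRef rest s
      else
        ("?u_" ++ PySem.Int.toStr ((s.length : Nat) : Int)) :: nvcRef rest (s ++ [e])
    else e :: nvcRef rest s

-- A's loop, with its dict indexing the seen-so-far list s, computes nvcRef
lemma nvcLoop_eq (rest : List String) : ∀ (s : List String) (d : PySem.Dict String String) (acc : List String),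
    (∀ e, d.get? e = (PySem.List.index? s e).map (fun (k : Nat) => "?u_" ++ PySem.Int.toStr (k : Int))) →
    nvcLoop rest d (s.length : Int) acc = acc ++ nvcRef rest s := by
  induction rest with
  | nil => intro s d acc _; simp [nvcLoop, nvcRef]
  | cons e rest ih =>
    intro s d acc hinv
    by_cases hp : PySem.Str.startswith e "?u_"
    · by_cases hm : e ∈ s
      · -- already seen
        obtain ⟨k, hk⟩ := Option.isSome_iff_exists.mp ((PySem.List.index?_isSome_iff s e).mpr hm)
        have hc : d.contains e = true := by
          rw [PySem.Dict.contains_eq_isSome_get?, hinv e, hk]; rfl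
        have hg : d.getD e "" = "?u_" ++ PySem.Int.toStr (k : Int) := by
          rw [PySem.Dict.getD_eq_get?_getD, hinv e, hk]; rfl
        simp only [nvcLoop, nvcRef]
        rw [if_pos hp, if_neg (by rw [hc]; simp), if_pos hp, if_pos hm,
          ih s d _ hinv, hg, hk]
        simp
      · -- fresh variable
        have hnone := (PySem.List.index?_eq_none_iff s e).mpr hm
        have hc : d.contains e = false := by
          rw [PySem.Dict.contains_eq_isSome_get?, hinv e, hnone]; rfl
        have hinv' : ∀ e', (d.insert e ("?u_" ++ PySem.Int.toStr (s.length : Int))).get? e'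
            = (PySem.List.index? (s ++ [e]) e').map (fun (k : Nat) => "?u_" ++ PySem.Int.toStr (k : Int)) := by
          intro e'
          rw [PySem.Dict.get?_insert]
          by_cases he : e' = e
          · subst he
            rw [PySem.List.index?_append_singleton_self s e' hm, if_pos rfl]
            rfl
          · rw [if_neg he]
            by_cases hm' : e' ∈ s
            · rw [PySem.List.index?_append_of_mem [e] hm', hinv e']
            · rw [hinv e', (PySem.List.index?_eq_none_iff s e').mpr hm',
                (PySem.List.index?_eq_none_iff _ e').mpr (by simp [hm', he])]
        have hlen : (s.length : Int) + 1 = ((s ++ [e]).length : Int) := by simp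
        simp only [nvcLoop, nvcRef]
        rw [if_pos hp, if_pos hc, if_pos hp, if_neg hm, PySem.Dict.getD_insert_self,
          hlen, ih (s ++ [e]) _ _ hinv']
        simp
    · simp only [nvcLoop, nvcRef]
      rw [if_neg hp, if_neg hp, ih s d _ hinv]
      simp

-- the seen-so-far index equals B's closed-form rank, so nvcRef computes B's pure map
lemma nvcRef_eq_rank (combo : List String) :
    ∀ (rest processed s : List String),
      combo = processed ++ rest →
      s = PySem.Set.ofList (processed.filter (fun x => PySem.Str.startswith x "?u_")) →
      (∀ e ∈ s, (PySem.List.index? s e).getD 0 = nvcRank combo e) →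
      nvcRef rest s = rest.map (fun e => if PySem.Str.startswith e "?u_"
        then "?u_" ++ PySem.Int.toStr ((nvcRank combo e : Nat) : Int) else e) := by
  intro rest
  induction rest with
  | nil => intro _ _ _ _ _; simp [nvcRef]
  | cons e rest ih =>
    intro processed s hcombo hs h2
    by_cases hp : PySem.Str.startswith e "?u_"
    · by_cases hm : e ∈ s
      · -- already seen: its index in s is its rank, and s is unchanged
        have hs' : s = PySem.Set.ofList ((processed ++ [e]).filter (fun x => PySem.Str.startswith x "?u_")) := by
          simp only [List.filter_append, List.filter_singleton, hp, cond_true]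
          rw [PySem.Set.ofList_append_singleton, ← hs, PySem.Set.add_of_mem hm]
        simp only [nvcRef, List.map_cons]
        rw [if_pos hm, if_pos hp, if_pos hp, h2 e hm,
          ih (processed ++ [e]) s (by rw [hcombo, List.append_assoc]; rfl) hs' h2]
      · -- fresh: its rank is s.length
        have hnp : e ∉ processed := by
          intro hep
          exact hm (by rw [hs, PySem.Set.mem_ofList]; exact List.mem_filter.mpr ⟨hep, hp⟩)
        have hidx : PySem.List.index? combo e = some processed.length := by
          rw [PySem.List.index?_eq_some_iff]
          exact ⟨processed, rest, hcombo, rfl, hnp⟩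
        have hrank : nvcRank combo e = s.length := by
          unfold nvcRank
          rw [hidx]
          simp only [Option.getD_some]
          rw [PySem.List.slice_to_natCast, hcombo, List.take_left, hs]
        have hadd : s ++ [e] = PySem.Set.ofList ((processed ++ [e]).filter (fun x => PySem.Str.startswith x "?u_")) := by
          simp only [List.filter_append, List.filter_singleton, hp, cond_true]
          rw [PySem.Set.ofList_append_singleton, ← hs, PySem.Set.add_of_not_mem hm]
        have h2' : ∀ e' ∈ s ++ [e], (PySem.List.index? (s ++ [e]) e').getD 0 = nvcRank combo e' := by
          intro e' he'
          by_cases hm' : e' ∈ s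
          · rw [PySem.List.index?_append_of_mem [e] hm']
            exact h2 e' hm'
          · have : e' = e := by
              rcases List.mem_append.mp he' with h | h
              · exact absurd h hm'
              · simpa using h
            subst this
            rw [PySem.List.index?_append_singleton_self s e' hm]
            simp [hrank]
        simp only [nvcRef, List.map_cons]
        rw [if_neg hm, if_pos hp, if_pos hp, hrank,
          ih (processed ++ [e]) (s ++ [e]) (by rw [hcombo, List.append_assoc]; rfl) hadd h2']
    · -- not a variable: passed through unchanged, s unchanged
      have hs' : s = PySem.Set.ofList ((processed ++ [e]).filter (fun x => PySem.Str.startswith x "?u_")) := by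
        simp only [List.filter_append, List.filter_singleton,
          Bool.not_eq_true _ ▸ eq_false_of_ne_true hp, cond_false, List.append_nil, hs]
      simp only [nvcRef, List.map_cons]
      rw [if_neg hp, if_neg hp,
        ih (processed ++ [e]) s (by rw [hcombo, List.append_assoc]; rfl) hs' h2]

-- ===== VERDICT (by name: the statement is the Claim_ definition above) =====
theorem normalize_var_combo_spec : Claim_equal_normalize_var_combo := by
  intro combo _
  unfold Spec_normalize_var_combo normalize_var_combo normalize_var_combo_alt
  have h0 := nvcLoop_eq combo [] PySem.Dict.empty []
    (fun e => by simp [PySem.Dict.get?_empty, PySem.List.index?_eq_idxOf?])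
  simp only [List.length_nil, Nat.cast_zero, List.nil_append] at h0
  rw [h0, nvcRef_eq_rank combo combo [] [] rfl (by simp) (by simp)]
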